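-- pv_equiv track=rewrite | github.com/evgen-ryzhkov/computer_vision | credit_card_reader/scripts/card_reader.py | _find_expiry_date_among_candidates
-- ===== SOURCE A (Python) =====
-- def _find_expiry_date_among_candidates(canditate_texts):
--     # convert texts to array by '\n' for easier further work
--     canditate_arr = canditate_texts.split('\n')
--
--     # expiry date is:
--     # -- contains /
--     # todo there isn't any processing for case when there are several dates on the card
--     # it could be solve by comparing the dates and choosing the biggest one
--     expiry_date = ''
--     for candidate in canditate_arr:
--         if '/' in candidate:
--             expiry_date = candidate
--             break
--     return expiry_date
-- ===== SOURCE B (Python) =====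
-- def _find_expiry_date_among_candidates(canditate_texts):
--     # single streaming pass over the characters: build the current line as we go,
--     # return it as soon as it is complete and contains '/'; no list of lines is built
--     line = ''
--     for ch in canditate_texts:
--         if ch == '\n':
--             if '/' in line:
--                 return line
--             line = ''
--         else:
--             line += ch
--     return line if '/' in line else ''
-- ===== Notes on version B (the rewrite author's own statement) =====
-- stated objective: alternative
-- what changed: Replaces splitting the text into a materialised list of lines and scanning that list by a single streaming pass over the characters that accumulates the current line and returns it at the first line break (or end of text) where the line contains a slash.
import Mathlib
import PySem

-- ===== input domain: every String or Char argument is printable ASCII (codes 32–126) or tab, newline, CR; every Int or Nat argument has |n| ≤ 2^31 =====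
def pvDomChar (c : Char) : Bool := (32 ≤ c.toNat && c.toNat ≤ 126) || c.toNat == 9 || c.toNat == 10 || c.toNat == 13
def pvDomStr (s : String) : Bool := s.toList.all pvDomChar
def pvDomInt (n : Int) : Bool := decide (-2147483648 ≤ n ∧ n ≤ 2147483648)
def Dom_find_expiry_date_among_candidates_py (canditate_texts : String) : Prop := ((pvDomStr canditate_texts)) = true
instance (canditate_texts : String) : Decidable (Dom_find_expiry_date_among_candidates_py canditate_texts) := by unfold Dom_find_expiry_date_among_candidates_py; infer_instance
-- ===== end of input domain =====

-- B replaces split-into-lines-then-scan with a single streaming pass over the characters (alternative decomposition, same cost).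


-- ===== PORT A =====
-- the 'for candidate in canditate_arr: if "/" in candidate: … break' loop (first match, else the initial '')
def pvALoop : List (List Char) → String
  | [] => ""
  | c :: rest => if PySem.Chars.isIn ['/'] c then String.ofList c else pvALoop rest

def find_expiry_date_among_candidates_py (canditate_texts : String) : String :=
  pvALoop (PySem.Chars.splitOn canditate_texts.toList ['\n'])

-- ===== PORT B =====
-- the streaming loop of Source B: 'line' is the current line, early return at a '\n' whose line contains '/'
def pvBGo : List Char → List Char → String
  | line, [] => if PySem.Chars.isIn ['/'] line then String.ofList line else ""
  | line, ch :: rest =>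
      if ch = '\n' then
        if PySem.Chars.isIn ['/'] line then String.ofList line else pvBGo [] rest
      else pvBGo (line ++ [ch]) rest

def find_expiry_date_among_candidates_py_alt (canditate_texts : String) : String :=
  pvBGo [] canditate_texts.toList

-- ===== PRECONDITION & SPEC =====
def Spec_find_expiry_date_among_candidates_py (canditate_texts : String) (out : String) : Prop := out = find_expiry_date_among_candidates_py_alt canditate_texts
instance (canditate_texts : String) (out : String) : Decidable (Spec_find_expiry_date_among_candidates_py canditate_texts out) := by unfold Spec_find_expiry_date_among_candidates_py; infer_instance

-- ===== CLAIM (what is proved, stated in full; the proofs are below) =====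
def Claim_equal_find_expiry_date_among_candidates_py : Prop := ∀ (canditate_texts : String), Dom_find_expiry_date_among_candidates_py canditate_texts → Spec_find_expiry_date_among_candidates_py canditate_texts (find_expiry_date_among_candidates_py canditate_texts)

-- ===== LEMMAS AND PROOFS =====

-- clean structural recursion computing splitOn · ['\n'] with the current (partial) line as accumulator
def pvSplitAux : List Char → List Char → List (List Char)
  | pre, [] => [pre]
  | pre, c :: rest => if c = '\n' then pre :: pvSplitAux [] rest else pvSplitAux (pre ++ [c]) rest

theorem pvSplitOn_go_eq (l : List Char) : ∀ (fuel : Nat) (cur : List Char) (acc : List (List Char)),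
    l.length < fuel →
    PySem.Chars.splitOn.go ['\n'] fuel l cur acc = acc.reverse ++ pvSplitAux cur.reverse l := by
  induction l with
  | nil =>
      intro fuel cur acc _
      cases fuel with
      | zero => omega
      | succ f => simp [PySem.Chars.splitOn.go, pvSplitAux]
  | cons c rest ih =>
      intro fuel cur acc hf
      cases fuel with
      | zero => omega
      | succ f =>
          by_cases h : c = '\n'
          · subst h
            simp only [PySem.Chars.splitOn.go, List.isPrefixOf]
            simp [ih f [] (cur.reverse :: acc) (by simpa using Nat.lt_of_succ_lt_succ hf), pvSplitAux]
          · simp only [PySem.Chars.splitOn.go]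
            rw [if_neg (by simp [List.isPrefixOf]; exact fun e => h e.symm)]
            rw [ih f (c :: cur) acc (by simpa using Nat.lt_of_succ_lt_succ hf)]
            simp [pvSplitAux, h]

theorem pvSplitOn_eq (s : List Char) :
    PySem.Chars.splitOn s ['\n'] = pvSplitAux [] s := by
  simpa using pvSplitOn_go_eq s (s.length + 1) [] [] (Nat.lt_succ_self _)

theorem pvBGo_eq (cs : List Char) : ∀ line, pvBGo line cs = pvALoop (pvSplitAux line cs) := by
  induction cs with
  | nil => intro line; simp [pvBGo, pvSplitAux, pvALoop]
  | cons c rest ih =>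
      intro line
      by_cases h : c = '\n' <;> simp [pvBGo, pvSplitAux, pvALoop, h, ih]

-- ===== VERDICT (by name: the statement is the Claim_ definition above) =====
theorem find_expiry_date_among_candidates_py_spec : Claim_equal_find_expiry_date_among_candidates_py := by
  intro s _
  unfold Spec_find_expiry_date_among_candidates_py find_expiry_date_among_candidates_py find_expiry_date_among_candidates_py_alt
  rw [pvSplitOn_eq, pvBGo_eq]
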